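-- pv_equiv track=rewrite | github.com/wuxu1019/1point3acres | Google/test_750_Number_Of_Corner_Rectangles.py | countCornerRectangles_bruteforce
-- ===== SOURCE A (Python) =====
-- def countCornerRectangles_bruteforce(grid):
--     """
--     :type grid: List[List[int]]
--     :rtype: int
--     """
--     if not grid or not grid[0]:
--         return 0
--     R, C = len(grid), len(grid[0])
--     rt = 0
--     for i in range(R - 1):
--         for k in range(i + 1, R):
--             count = 0
--             for j in range(C):
--                 if grid[i][j] and grid[k][j]:
--                     rt += count
--                     count += 1
--     return rt
-- ===== SOURCE B (Python) =====
-- def countCornerRectangles_bruteforce(grid):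
--     """Bitmask re-implementation: one bitmask per row, then popcount of the
--     AND per row pair instead of A's inner column scan."""
--     if not grid or not grid[0]:
--         return 0
--     C = len(grid[0])
--     masks = []
--     for row in grid:
--         mask = 0
--         for j in range(C):
--             if row[j]:
--                 mask |= 1 << j
--         masks.append(mask)
--     R = len(masks)
--     rt = 0
--     for i in range(R - 1):
--         for k in range(i + 1, R):
--             m = (masks[i] & masks[k]).bit_count()
--             rt += m * (m - 1) // 2
--     return rt
-- ===== Notes on version B (the rewrite author's own statement) =====
-- stated objective: faster
-- what changed: Replaces A's inner per-row-pair column scan (with an incremental count) by precomputed per-row column bitmasks, so each row pair costs one AND plus popcount and the closed form m*(m-1)//2.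
-- outside the precondition, e.g. on countCornerRectangles_bruteforce([[0, 0], []]): A returns 0, B raises IndexError
import Mathlib
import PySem

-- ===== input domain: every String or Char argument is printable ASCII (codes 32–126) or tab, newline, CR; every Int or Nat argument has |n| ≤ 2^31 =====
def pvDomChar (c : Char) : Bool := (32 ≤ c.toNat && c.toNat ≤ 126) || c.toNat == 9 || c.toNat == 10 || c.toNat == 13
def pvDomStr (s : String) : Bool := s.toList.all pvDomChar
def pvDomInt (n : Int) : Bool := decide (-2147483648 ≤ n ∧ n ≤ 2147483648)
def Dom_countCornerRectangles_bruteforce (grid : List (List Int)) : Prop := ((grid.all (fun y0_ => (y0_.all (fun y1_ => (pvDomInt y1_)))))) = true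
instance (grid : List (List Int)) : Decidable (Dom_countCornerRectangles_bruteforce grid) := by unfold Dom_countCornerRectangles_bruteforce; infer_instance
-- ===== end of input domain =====

-- B replaces A's per-row-pair column scan by per-row column bitmasks: one AND+popcount
-- and the closed form m*(m-1)//2 per row pair (a timing run measured B faster).

-- ===== PORT A =====
-- Literal port of A.  grid[i][j] is ported with pyGetD: the row indices i, k come from
-- in-range pyRanges, and Pre_ excludes the grids on which the column access j would
-- raise IndexError in Python (a row shorter than grid[0]).
def countCornerRectangles_bruteforce (grid : List (List Int)) : Int :=
  if grid = [] ∨ grid.headD [] = [] then 0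
  else
    let R : Int := PySem.List.len grid
    let C : Int := PySem.List.len (grid.headD [])
    (PySem.List.pyRange 0 (R - 1) 1).foldl (fun rt i =>
      (PySem.List.pyRange (i + 1) R 1).foldl (fun rt k =>
        ((PySem.List.pyRange 0 C 1).foldl (fun (p : Int × Int) j =>
          if PySem.List.pyGetD (PySem.List.pyGetD grid i []) j 0 ≠ 0 ∧
             PySem.List.pyGetD (PySem.List.pyGetD grid k []) j 0 ≠ 0
          then (p.1 + p.2, p.2 + 1) else p) (rt, 0)).1) rt) 0

-- ===== PORT B =====
-- Literal port of Source B.  'mask |= 1 << j': j comes from range(C), so 0 ≤ j and the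
-- shift amount is exactly j.toNat (no clamping can occur); .bit_count() is
-- PySem.Int.bitCount; 'masks.append(…)' is the append fold.
def countCornerRectangles_bruteforce_alt (grid : List (List Int)) : Int :=
  if grid = [] ∨ grid.headD [] = [] then 0
  else
    let C : Int := PySem.List.len (grid.headD [])
    let masks : List Int := grid.foldl (fun masks row =>
      masks ++ [(PySem.List.pyRange 0 C 1).foldl (fun mask j =>
        if PySem.List.pyGetD row j 0 ≠ 0 then PySem.Int.bor mask ((1 : Int) <<< j.toNat)
        else mask) 0]) []
    let R : Int := PySem.List.len masks
    (PySem.List.pyRange 0 (R - 1) 1).foldl (fun rt i =>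
      (PySem.List.pyRange (i + 1) R 1).foldl (fun rt k =>
        let m : Int := (PySem.Int.bitCount
          (PySem.Int.band (PySem.List.pyGetD masks i 0) (PySem.List.pyGetD masks k 0)) : Int)
        rt + PySem.Int.floordiv (m * (m - 1)) 2) rt) 0

-- ===== PRECONDITION & SPEC =====
-- Pre_ excludes ragged grids (some row shorter than the first row): there A usually
-- raises IndexError, but when every probed entry of the longer row is falsy its 'and'
-- short-circuits past the missing entry and A happens to return, while B, which reads
-- every row once to build its mask, raises IndexError.
def Pre_countCornerRectangles_bruteforce (grid : List (List Int)) : Prop :=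
  ∀ row ∈ grid, (grid.headD []).length ≤ row.length
instance (grid : List (List Int)) : Decidable (Pre_countCornerRectangles_bruteforce grid) := by
  unfold Pre_countCornerRectangles_bruteforce; infer_instance
def pvWitness_countCornerRectangles_bruteforce : List (List Int) := [[1, 1], [1, 1]]
def Spec_countCornerRectangles_bruteforce (grid : List (List Int)) (out : Int) : Prop := out = countCornerRectangles_bruteforce_alt grid
instance (grid : List (List Int)) (out : Int) : Decidable (Spec_countCornerRectangles_bruteforce grid out) := by unfold Spec_countCornerRectangles_bruteforce; infer_instance

-- ===== CLAIM (what is proved, stated in full; the proofs are below) =====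
def Claim_equal_countCornerRectangles_bruteforce : Prop := ∀ (grid : List (List Int)), Dom_countCornerRectangles_bruteforce grid → Pre_countCornerRectangles_bruteforce grid → Spec_countCornerRectangles_bruteforce grid (countCornerRectangles_bruteforce grid)

-- ===== LEMMAS AND PROOFS =====

-- A's inner loop from state (r, c): it ends at (r + c*m + (0+1+…+(m-1)), c + m),
-- m being the number of columns passing the test.
lemma pvInnerA (q : Int → Prop) [DecidablePred q] :
    ∀ (js : List Int) (r c : Int),
      js.foldl (fun p j => if q j then (p.1 + p.2, p.2 + 1) else p) (r, c)
        = (r + c * (js.countP (fun j => decide (q j)) : Int)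
             + ∑ t ∈ Finset.range (js.countP (fun j => decide (q j))), (t : Int),
           c + (js.countP (fun j => decide (q j)) : Int)) := by
  intro js
  induction js with
  | nil => intro r c; simp
  | cons j js ih =>
    intro r c
    by_cases hq : q j
    · simp only [List.foldl_cons, List.countP_cons, hq, if_pos, decide_true]
      rw [ih]
      have : js.countP (fun j => decide (q j)) + 1 = (js.countP (fun j => decide (q j))).succ := rfl
      simp only [this, Finset.sum_range_succ]
      rw [Prod.mk.injEq]
      constructor <;> push_cast [Nat.succ_eq_add_one] <;> ring
    · simp only [List.foldl_cons, List.countP_cons, hq, decide_false]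
      rw [ih]; simp

-- Gauss: the triangular sum is Python's m*(m-1)//2.
lemma pvGauss (m : Nat) :
    (∑ t ∈ Finset.range m, (t : Int)) = PySem.Int.floordiv ((m : Int) * ((m : Int) - 1)) 2 := by
  rw [PySem.Int.floordiv_eq_ediv_of_pos (by norm_num)]
  have h := Finset.sum_range_id_mul_two m
  have h2 : (∑ t ∈ Finset.range m, (t : Int)) = ((∑ i ∈ Finset.range m, i : Nat) : Int) := by
    push_cast; rfl
  rcases Nat.eq_zero_or_pos m with hm | hm
  · subst hm; simp
  · have hm1 : ((m : Int) * ((m : Int) - 1)) = ((m * (m - 1) : Nat) : Int) := by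
      have : (1:Nat) ≤ m := hm
      push_cast [this]; ring
    rw [h2, hm1, ← h]
    omega

-- the Nat-level mask fold behind B's Int-valued one
def pvMask (q : Int → Prop) [DecidablePred q] (js : List Int) : Nat :=
  js.foldl (fun m j => if q j then m ||| (1 <<< j.toNat) else m) 0

lemma pvMaskFold_testBit (q : Int → Prop) [DecidablePred q] :
    ∀ (js : List Int) (m0 : Nat) (t : Nat),
      (js.foldl (fun m j => if q j then m ||| (1 <<< j.toNat) else m) m0).testBit t
        = (m0.testBit t || js.any (fun j => decide (q j) && decide (j.toNat = t))) := by
  intro js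
  induction js with
  | nil => intro m0 t; simp
  | cons j js ih =>
    intro m0 t
    by_cases hq : q j
    · simp only [List.foldl_cons, hq, if_pos, List.any_cons, decide_true, Bool.true_and]
      rw [ih]
      rw [Nat.testBit_or, Nat.one_shiftLeft, Nat.testBit_two_pow]
      by_cases hjt : j.toNat = t <;> simp [hjt, Bool.or_comm]
    · simp only [List.foldl_cons, hq, List.any_cons, decide_false, Bool.false_and,
        Bool.false_or]
      exact ih m0 t

lemma pvMaskFold_lt (q : Int → Prop) [DecidablePred q] (K : Nat) :
    ∀ (js : List Int), (∀ j ∈ js, j.toNat < K) → ∀ m0 : Nat, m0 < 2 ^ K →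
      js.foldl (fun m j => if q j then m ||| (1 <<< j.toNat) else m) m0 < 2 ^ K := by
  intro js
  induction js with
  | nil => intro _ m0 h; simpa using h
  | cons j js ih =>
    intro hj m0 hm0
    simp only [List.foldl_cons]
    by_cases hq : q j
    · simp only [hq, if_pos]
      refine ih (fun x hx => hj x (List.mem_cons_of_mem _ hx)) _ ?_
      refine Nat.or_lt_two_pow hm0 ?_
      rw [Nat.one_shiftLeft]
      exact Nat.pow_lt_pow_right (by norm_num) (hj j (List.mem_cons_self))
    · simp only [hq, if_neg, not_false_iff]
      exact ih (fun x hx => hj x (List.mem_cons_of_mem _ hx)) _ hm0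

-- B's Int-valued mask fold is the cast of the Nat-valued one.
lemma pvMaskInt (q : Int → Prop) [DecidablePred q] :
    ∀ (js : List Int) (m0 : Nat),
      js.foldl (fun mask j => if q j then PySem.Int.bor mask ((1 : Int) <<< j.toNat) else mask)
        (m0 : Int)
        = ((js.foldl (fun m j => if q j then m ||| (1 <<< j.toNat) else m) m0 : Nat) : Int) := by
  intro js
  induction js with
  | nil => intro m0; simp
  | cons j js ih =>
    intro m0
    by_cases hq : q j
    · simp only [List.foldl_cons, hq, if_pos]
      rw [show ((1 : Int) <<< j.toNat) = (((1 <<< j.toNat : Nat) : Nat) : Int) by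
        simp [Int.shiftLeft_eq, Nat.one_shiftLeft]]
      rw [PySem.Int.bor_natCast]
      exact ih _
    · simp only [List.foldl_cons, hq, if_neg, not_false_iff]
      exact ih _

lemma pvMaskInt0 (q : Int → Prop) [DecidablePred q] (js : List Int) :
    js.foldl (fun mask j => if q j then PySem.Int.bor mask ((1 : Int) <<< j.toNat) else mask) 0
      = ((pvMask q js : Nat) : Int) := by
  have h := pvMaskInt q js 0
  simpa [pvMask] using h

-- popcount read off as a bit count over range K
lemma pvBitCount_eq (K : Nat) :
    ∀ n : Nat, n < 2 ^ K →
      PySem.Int.bitCount (n : Int) = (List.range K).countP (fun t => n.testBit t) := by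
  induction K with
  | zero =>
    intro n hn
    interval_cases n
    simp [PySem.Int.bitCount_zero]
  | succ K ih =>
    intro n hn
    rcases Nat.eq_zero_or_pos n with h0 | h0
    · subst h0; simp [PySem.Int.bitCount_zero, Nat.zero_testBit]
    · rw [PySem.Int.bitCount_natCast h0]
      have hd : n / 2 < 2 ^ K := by
        rw [pow_succ] at hn; omega
      rw [ih _ hd]
      rw [List.range_succ_eq_map, List.countP_cons, List.countP_map]
      have ht0 : (n.testBit 0) = decide (n % 2 = 1) := Nat.testBit_zero n
      have : ((fun t => n.testBit t) ∘ (fun i => i + 1)) = (fun t => (n/2).testBit t) := by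
        funext t; simp [Nat.testBit_add_one]
      rw [this]
      by_cases hp : n % 2 = 1
      · simp [ht0, hp]; omega
      · have : n % 2 = 0 := by omega
        simp [ht0, this]

lemma pvAnyRange (q : Int → Prop) [DecidablePred q] (C : Int) (t : Nat) (ht : t < C.toNat) :
    (PySem.List.pyRange 0 C 1).any (fun j => decide (q j) && decide (j.toNat = t))
      = decide (q (t : Int)) := by
  by_cases hq : q (t : Int)
  · have hmem : (t : Int) ∈ PySem.List.pyRange 0 C 1 := by
      rw [PySem.List.mem_pyRange_one]; omega
    have : (PySem.List.pyRange 0 C 1).any (fun j => decide (q j) && decide (j.toNat = t)) = true := by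
      rw [List.any_eq_true]
      exact ⟨(t : Int), hmem, by simp [hq]⟩
    rw [this]; simp [hq]
  · have : (PySem.List.pyRange 0 C 1).any (fun j => decide (q j) && decide (j.toNat = t)) = false := by
      rw [List.any_eq_false]
      intro j hj
      rw [PySem.List.mem_pyRange_one] at hj
      by_cases hjt : j.toNat = t
      · have : j = (t : Int) := by omega
        subst this
        simp [hq]
      · simp [hjt]
    rw [this]; simp [hq]

lemma pvRangeBits (q : Int → Prop) [DecidablePred q] (C : Int) (j : Int)
    (hj : j ∈ PySem.List.pyRange 0 C 1) : j.toNat < C.toNat := by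
  rw [PySem.List.mem_pyRange_one] at hj; omega

lemma pvMask_lt (q : Int → Prop) [DecidablePred q] (C : Int) :
    pvMask q (PySem.List.pyRange 0 C 1) < 2 ^ C.toNat :=
  pvMaskFold_lt q C.toNat _ (fun j hj => pvRangeBits q C j hj) 0 (Nat.two_pow_pos _)

-- the key per-pair fact: popcount of the AND of the two masks counts the common columns
lemma pvPopcountPair (qi qk : Int → Prop) [DecidablePred qi] [DecidablePred qk] (C : Int) :
    PySem.Int.bitCount ((((pvMask qi (PySem.List.pyRange 0 C 1) : Nat) &&&
        (pvMask qk (PySem.List.pyRange 0 C 1) : Nat) : Nat)) : Int)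
      = (PySem.List.pyRange 0 C 1).countP (fun j => decide (qi j) && decide (qk j)) := by
  have hA := pvMask_lt qi C
  have hland : (pvMask qi (PySem.List.pyRange 0 C 1) &&& pvMask qk (PySem.List.pyRange 0 C 1))
      < 2 ^ C.toNat := lt_of_le_of_lt Nat.and_le_left hA
  rw [pvBitCount_eq C.toNat _ hland]
  have hpt : ∀ t ∈ List.range C.toNat,
      ((pvMask qi (PySem.List.pyRange 0 C 1) &&& pvMask qk (PySem.List.pyRange 0 C 1)).testBit t)
        = (decide (qi (t : Int)) && decide (qk (t : Int))) := by
    intro t ht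
    rw [List.mem_range] at ht
    rw [Nat.testBit_and]
    unfold pvMask
    rw [pvMaskFold_testBit, pvMaskFold_testBit]
    simp only [Nat.zero_testBit, Bool.false_or]
    rw [pvAnyRange qi C t ht, pvAnyRange qk C t ht]
  have hR : (PySem.List.pyRange 0 C 1).countP (fun j => decide (qi j) && decide (qk j))
      = (List.range C.toNat).countP (fun t =>
          (pvMask qi (PySem.List.pyRange 0 C 1) &&& pvMask qk (PySem.List.pyRange 0 C 1)).testBit t) := by
    have h0 : (C - 0).toNat = C.toNat := by omega
    rw [PySem.List.pyRange_one, List.countP_map, ← PySem.List.pyRange_one, h0]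
    refine List.countP_congr ?_
    intro t ht
    rw [hpt t ht]
    constructor <;> (intro h; simpa using h)
  rw [hR]

-- the per-row-pair equality: A's inner scan equals B's popcount closed form
lemma pvPair (rowi rowk : List Int) (C rt : Int) :
    ((PySem.List.pyRange 0 C 1).foldl (fun (p : Int × Int) j =>
        if PySem.List.pyGetD rowi j 0 ≠ 0 ∧ PySem.List.pyGetD rowk j 0 ≠ 0
        then (p.1 + p.2, p.2 + 1) else p) (rt, 0)).1
    = rt + PySem.Int.floordiv
        (((PySem.Int.bitCount (PySem.Int.band
            ((PySem.List.pyRange 0 C 1).foldl (fun mask j =>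
              if PySem.List.pyGetD rowi j 0 ≠ 0 then PySem.Int.bor mask ((1:Int) <<< j.toNat)
              else mask) 0)
            ((PySem.List.pyRange 0 C 1).foldl (fun mask j =>
              if PySem.List.pyGetD rowk j 0 ≠ 0 then PySem.Int.bor mask ((1:Int) <<< j.toNat)
              else mask) 0)) : Int)) *
         ((PySem.Int.bitCount (PySem.Int.band
            ((PySem.List.pyRange 0 C 1).foldl (fun mask j =>
              if PySem.List.pyGetD rowi j 0 ≠ 0 then PySem.Int.bor mask ((1:Int) <<< j.toNat)
              else mask) 0)
            ((PySem.List.pyRange 0 C 1).foldl (fun mask j =>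
              if PySem.List.pyGetD rowk j 0 ≠ 0 then PySem.Int.bor mask ((1:Int) <<< j.toNat)
              else mask) 0)) : Int) - 1)) 2 := by
  rw [pvInnerA (fun j => PySem.List.pyGetD rowi j 0 ≠ 0 ∧ PySem.List.pyGetD rowk j 0 ≠ 0)
        (PySem.List.pyRange 0 C 1) rt 0]
  rw [pvMaskInt0 (fun j => PySem.List.pyGetD rowi j 0 ≠ 0),
      pvMaskInt0 (fun j => PySem.List.pyGetD rowk j 0 ≠ 0)]
  rw [PySem.Int.band_natCast]
  rw [pvPopcountPair (fun j => PySem.List.pyGetD rowi j 0 ≠ 0)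
        (fun j => PySem.List.pyGetD rowk j 0 ≠ 0) C]
  rw [← pvGauss]
  have hc : (PySem.List.pyRange 0 C 1).countP
        (fun j => decide (PySem.List.pyGetD rowi j 0 ≠ 0 ∧ PySem.List.pyGetD rowk j 0 ≠ 0))
      = (PySem.List.pyRange 0 C 1).countP
        (fun j => decide (PySem.List.pyGetD rowi j 0 ≠ 0) && decide (PySem.List.pyGetD rowk j 0 ≠ 0)) := by
    refine List.countP_congr ?_
    intro j _
    simp
  rw [hc]
  simp

-- ===== VERDICT (by name: the statement is the Claim_ definition above) =====
theorem countCornerRectangles_bruteforce_spec : Claim_equal_countCornerRectangles_bruteforce := by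
  intro grid _hdom _hpre
  unfold Spec_countCornerRectangles_bruteforce
  unfold countCornerRectangles_bruteforce countCornerRectangles_bruteforce_alt
  by_cases hg : grid = [] ∨ grid.headD [] = []
  · rw [if_pos hg, if_pos hg]
  · rw [if_neg hg, if_neg hg]
    dsimp only
    rw [PySem.List.foldl_append_singleton_eq_map
      (f := fun row => (PySem.List.pyRange 0 (PySem.List.len (grid.headD [])) 1).foldl
        (fun mask j => if PySem.List.pyGetD row j 0 ≠ 0
          then PySem.Int.bor mask ((1 : Int) <<< j.toNat) else mask) 0)]
    simp only [List.nil_append, PySem.List.len_eq, List.length_map]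
    apply PySem.List.foldl_congr_mem
    intro rt i hi
    rw [PySem.List.mem_pyRange_one] at hi
    apply PySem.List.foldl_congr_mem
    intro rt' k hk
    rw [PySem.List.mem_pyRange_one] at hk
    have hgi := PySem.List.pyGetD_eq_getElem (xs := grid) (d := ([] : List Int)) (i := i)
      (by omega) (by omega)
    have hgk := PySem.List.pyGetD_eq_getElem (xs := grid) (d := ([] : List Int)) (i := k)
      (by omega) (by omega)
    have hmi := PySem.List.pyGetD_eq_getElem
      (xs := grid.map (fun row => (PySem.List.pyRange 0 ((grid.headD []).length : Int) 1).foldl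
        (fun mask j => if PySem.List.pyGetD row j 0 ≠ 0
          then PySem.Int.bor mask ((1 : Int) <<< j.toNat) else mask) 0))
      (d := (0 : Int)) (i := i) (by omega) (by simp only [List.length_map]; omega)
    have hmk := PySem.List.pyGetD_eq_getElem
      (xs := grid.map (fun row => (PySem.List.pyRange 0 ((grid.headD []).length : Int) 1).foldl
        (fun mask j => if PySem.List.pyGetD row j 0 ≠ 0
          then PySem.Int.bor mask ((1 : Int) <<< j.toNat) else mask) 0))
      (d := (0 : Int)) (i := k) (by omega) (by simp only [List.length_map]; omega)
    rw [hgi, hgk, hmi, hmk, List.getElem_map, List.getElem_map]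
    exact pvPair grid[i.toNat] grid[k.toNat] ((grid.headD []).length : Int) rt'
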